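-- pv_equiv track=rewrite | github.com/hovavalster/AI_News_Digest | summarizer.py | _fallback_digest
-- ===== SOURCE A (Python) =====
-- from collections import defaultdict
--
-- def _fallback_digest(articles: list[dict], reason: str = "") -> str:
--     """
--     Simple fallback: lists article titles grouped by topic.
--     Used when the API key is missing or the Claude call fails.
--     """
--     lines = ["=== AI News Digest (fallback mode) ==="]
--     if reason:
--         lines.append(f"Note: {reason}\n")
--
--     by_topic: dict[str, list[dict]] = defaultdict(list)
--     for article in articles:
--         topic = article.get("topic", "Other")
--         by_topic[topic].append(article)
--
--     for topic in ["Claude Code", "Gemini", "NotebookLM"]: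
--         lines.append(f"\n{topic}")
--         lines.append("-" * len(topic))
--         topic_articles = by_topic.get(topic, [])
--         if topic_articles:
--             for a in topic_articles:
--                 title = a.get("title", "No title")
--                 source = a.get("source", "Unknown source")
--                 published = a.get("published", "")
--                 date_str = f" ({published})" if published else ""
--                 lines.append(f"• {title} — {source}{date_str}")
--         else:
--             lines.append("• No updates today.")
--
--     # Include any topics not in the main three
--     other_topics = [t for t in by_topic if t not in ("Claude Code", "Gemini", "NotebookLM")]
--     if other_topics:
--         lines.append("\nOther")
--         lines.append("-----")
--         for topic in other_topics:
--             for a in by_topic[topic]: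
--                 title = a.get("title", "No title")
--                 lines.append(f"• [{topic}] {title}")
--
--     return "\n".join(lines)
-- ===== SOURCE B (Python) =====
-- def _fallback_digest(articles: list[dict], reason: str = "") -> str:
--     MAIN = ["Claude Code", "Gemini", "NotebookLM"]
--
--     def topic_of(a):
--         return a.get("topic", "Other")
--
--     def bullet(a):
--         pub = a.get("published", "")
--         return "• %s — %s%s" % (
--             a.get("title", "No title"),
--             a.get("source", "Unknown source"),
--             "" if not pub else " (%s)" % pub,
--         )
--
--     def section(t):
--         g = [bullet(a) for a in articles if topic_of(a) == t]
--         return ["\n" + t, "-" * len(t)] + (g if g else ["• No updates today."])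
--
--     head = ["=== AI News Digest (fallback mode) ==="] + (
--         ["Note: %s\n" % reason] if reason else []
--     )
--     body = [line for t in MAIN for line in section(t)]
--
--     extras = []
--     for a in articles:
--         t = topic_of(a)
--         if t not in MAIN and t not in extras:
--             extras.append(t)
--     tail = (
--         ["\nOther", "-----"]
--         + ["• [%s] %s" % (t, a.get("title", "No title"))
--            for t in extras for a in articles if topic_of(a) == t]
--         if extras else []
--     )
--     return "\n".join(head + body + tail)
-- ===== Notes on version B (the rewrite author's own statement) =====
-- stated objective: alternative
-- what changed: Replaces A's imperative defaultdict-index plus append-to-lines loops by a declarative assembly: the digest is head ++ flattened per-topic sections (each section a filter+map over articles) ++ a tail built from a first-appearance scan of extra topics followed by filter+map scans.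
import Mathlib
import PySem

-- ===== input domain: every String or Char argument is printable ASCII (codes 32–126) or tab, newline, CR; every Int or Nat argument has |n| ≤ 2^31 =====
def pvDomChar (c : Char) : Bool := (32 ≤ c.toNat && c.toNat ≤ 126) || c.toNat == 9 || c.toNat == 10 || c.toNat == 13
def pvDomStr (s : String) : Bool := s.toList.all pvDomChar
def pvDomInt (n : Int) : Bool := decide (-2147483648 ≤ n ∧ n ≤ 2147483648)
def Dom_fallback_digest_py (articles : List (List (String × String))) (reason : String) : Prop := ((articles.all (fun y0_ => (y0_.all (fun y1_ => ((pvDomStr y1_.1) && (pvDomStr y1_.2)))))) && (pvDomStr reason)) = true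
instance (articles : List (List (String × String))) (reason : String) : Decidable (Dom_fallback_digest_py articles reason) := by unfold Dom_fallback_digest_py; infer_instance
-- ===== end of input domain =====

-- B drops A's imperative defaultdict-index-and-append loops and instead assembles the
-- digest declaratively as head ++ (sections by filtering) ++ tail (objective: alternative).

-- article.get(k, dflt) on an article dict (association list, first match)
def pvGet (a : List (String × String)) (k dflt : String) : String :=
  (PySem.Dict.mk a).getD k dflt

-- ===== PORT A =====
-- f"• {title} — {source}{date_str}" for one article (A's loop body)
def pvFmtArticle (a : List (String × String)) : String :=
  let title := pvGet a "title" "No title"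
  let source := pvGet a "source" "Unknown source"
  let published := pvGet a "published" ""
  let date_str := if published ≠ "" then " (" ++ published ++ ")" else ""
  "• " ++ title ++ " — " ++ source ++ date_str

def fallback_digest_py (articles : List (List (String × String))) (reason : String) : String :=
  let lines : List String := ["=== AI News Digest (fallback mode) ==="]
  let lines := if reason ≠ "" then lines ++ ["Note: " ++ reason ++ "\n"] else lines
  let by_topic : PySem.Dict String (List (List (String × String))) :=
    articles.foldl (fun d a => d.modify (pvGet a "topic" "Other") [] (fun l => l ++ [a]))
      PySem.Dict.empty
  let lines := ["Claude Code", "Gemini", "NotebookLM"].foldl (fun ls topic =>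
      let ls := ls ++ ["\n" ++ topic] ++
        [String.ofList (PySem.List.pyRepeat ['-'] (PySem.Str.len topic))]
      let topic_articles := by_topic.getD topic []
      if topic_articles ≠ [] then
        topic_articles.foldl (fun ls2 a => ls2 ++ [pvFmtArticle a]) ls
      else
        ls ++ ["• No updates today."]) lines
  let other_topics := by_topic.keys.filter
      (fun t => !(t == "Claude Code" || t == "Gemini" || t == "NotebookLM"))
  let lines := if other_topics ≠ [] then
      other_topics.foldl (fun ls topic =>
        (by_topic.getD topic []).foldl
          (fun ls2 a => ls2 ++ ["• [" ++ topic ++ "] " ++ pvGet a "title" "No title"]) ls)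
        (lines ++ ["\nOther", "-----"])
    else lines
  PySem.Str.join "\n" lines

-- ===== PORT B =====
-- B's topic_of / bullet / section helpers
def pvTopicOf (a : List (String × String)) : String := pvGet a "topic" "Other"

def pvBullet (a : List (String × String)) : String :=
  let pub := pvGet a "published" ""
  "• " ++ pvGet a "title" "No title" ++ " — " ++ pvGet a "source" "Unknown source" ++
    (if pub == "" then "" else " (" ++ pub ++ ")")

def pvSection (articles : List (List (String × String))) (t : String) : List String :=
  let g := (articles.filter (fun a => pvTopicOf a == t)).map pvBullet
  ["\n" ++ t, String.ofList (PySem.List.pyRepeat ['-'] (PySem.Str.len t))] ++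
    (if g ≠ [] then g else ["• No updates today."])

def fallback_digest_py_alt (articles : List (List (String × String))) (reason : String) : String :=
  let head := ["=== AI News Digest (fallback mode) ==="] ++
    (if reason ≠ "" then ["Note: " ++ reason ++ "\n"] else [])
  let body := (["Claude Code", "Gemini", "NotebookLM"].map (pvSection articles)).flatten
  let extras := articles.foldl (fun seen a =>
      let t := pvTopicOf a
      if !(["Claude Code", "Gemini", "NotebookLM"].contains t) && !seen.contains t then
        seen ++ [t]
      else seen) ([] : List String)
  let tail := if extras ≠ [] then
      ["\nOther", "-----"] ++
        extras.flatMap (fun t =>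
          (articles.filter (fun a => pvTopicOf a == t)).map
            (fun a => "• [" ++ t ++ "] " ++ pvGet a "title" "No title"))
    else []
  PySem.Str.join "\n" (head ++ body ++ tail)

-- ===== PRECONDITION & SPEC =====
def Spec_fallback_digest_py (articles : List (List (String × String))) (reason : String) (out : String) : Prop := out = fallback_digest_py_alt articles reason
instance (articles : List (List (String × String))) (reason : String) (out : String) : Decidable (Spec_fallback_digest_py articles reason out) := by unfold Spec_fallback_digest_py; infer_instance

-- ===== CLAIM =====
def Claim_equal_fallback_digest_py : Prop := ∀ (articles : List (List (String × String))) (reason : String), Dom_fallback_digest_py articles reason → Spec_fallback_digest_py articles reason (fallback_digest_py articles reason)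

-- ===== LEMMAS AND PROOFS =====

-- the grouping dict's entry at c is the ordered filter of articles with topic c
theorem pv_getD_by_topic (articles : List (List (String × String))) (c : String) :
  (articles.foldl (fun d a => d.modify (pvGet a "topic" "Other") [] (fun l => l ++ [a])) PySem.Dict.empty).getD c []
  = articles.filter (fun a => pvGet a "topic" "Other" == c) := by
  have h := List.foldl_map (f := fun a : List (String × String) => (pvGet a "topic" "Other", a))
    (g := fun (d : PySem.Dict String (List (List (String × String)))) p => d.modify p.1 [] (fun l => l ++ [p.2]))
    (l := articles) (init := PySem.Dict.empty)
  simp only at h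
  rw [← h, PySem.Dict.getD_foldl_modify_append]
  simp [List.filter_map, Function.comp_def]

-- the grouping dict's keys are the topics in first-appearance order
theorem pv_keys_by_topic (articles : List (List (String × String))) :
  (articles.foldl (fun d a => d.modify (pvGet a "topic" "Other") [] (fun l => l ++ [a])) PySem.Dict.empty).keys
  = PySem.Set.update [] (articles.map (fun a => pvGet a "topic" "Other")) := by
  rw [PySem.Dict.keys_foldl_modify_key (key := fun a : List (String × String) => pvGet a "topic" "Other")
    (f := fun d a => fun l => l ++ [a])]
  simp [PySem.Dict.keys_empty]

-- filtering a first-appearance dedup = the one-pass seen loop with the combined test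
theorem pv_filter_update (p : String → Bool) (ts : List String) : ∀ (acc : List String),
  (PySem.Set.update acc ts).filter p
  = ts.foldl (fun s t => if p t && !s.contains t then s ++ [t] else s) (acc.filter p) := by
  induction ts with
  | nil => intro acc; rfl
  | cons t ts ih =>
    intro acc
    show (PySem.Set.update (PySem.Set.add acc t) ts).filter p = _
    rw [List.foldl_cons, ih]
    have hstep : List.filter p (PySem.Set.add acc t)
        = if p t && !(List.filter p acc).contains t then List.filter p acc ++ [t]
          else List.filter p acc := by
      by_cases hm : t ∈ acc <;> by_cases hp : p t = true <;>
        simp [PySem.Set.add, PySem.Set.contains, List.contains_eq_mem, hm, hp,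
          List.mem_filter, List.filter_append]
    rw [hstep]

-- A's other_topics list equals B's extras loop over the articles
theorem pv_others_eq (articles : List (List (String × String))) :
  ((articles.foldl (fun d a => d.modify (pvGet a "topic" "Other") [] (fun l => l ++ [a])) PySem.Dict.empty).keys).filter
      (fun t => !(t == "Claude Code" || t == "Gemini" || t == "NotebookLM"))
  = articles.foldl (fun seen a =>
      if !(["Claude Code", "Gemini", "NotebookLM"].contains (pvTopicOf a)) && !seen.contains (pvTopicOf a) then
        seen ++ [pvTopicOf a]
      else seen) ([] : List String) := by
  rw [pv_keys_by_topic,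
    pv_filter_update (fun t => !(t == "Claude Code" || t == "Gemini" || t == "NotebookLM"))]
  rw [List.foldl_map]
  simp only [pvTopicOf, List.contains_cons, List.contains_nil, Bool.or_false, Bool.or_assoc,
    List.filter_nil]

-- B's bullet formats an article exactly as A's loop body does
theorem pv_bullet_eq_fmt : pvBullet = pvFmtArticle := by
  funext a
  simp only [pvBullet, pvFmtArticle, ne_eq]
  by_cases h : pvGet a "published" "" = "" <;> simp [h]

-- A's per-topic block equals ls ++ B's section
theorem pv_section_eq (articles : List (List (String × String))) (ls : List String) (t : String) :
  (let ls := ls ++ ["\n" ++ t] ++ [String.ofList (PySem.List.pyRepeat ['-'] (PySem.Str.len t))]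
   let g := articles.filter (fun a => pvGet a "topic" "Other" == t)
   if g ≠ [] then g.foldl (fun ls2 a => ls2 ++ [pvFmtArticle a]) ls
   else ls ++ ["• No updates today."])
  = ls ++ pvSection articles t := by
  simp only [pvSection, pvTopicOf, PySem.List.foldl_append_singleton_eq_map, pv_bullet_eq_fmt]
  by_cases h : articles.filter (fun a => pvGet a "topic" "Other" == t) = [] <;>
    simp [h, List.append_assoc]

-- A's foldl over the three main topics is init ++ the flattened mapped sections
theorem pv_main_eq (articles : List (List (String × String))) (init : List String) :
  (["Claude Code", "Gemini", "NotebookLM"].foldl (fun ls topic =>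
    let ls := ls ++ ["\n" ++ topic] ++
      [String.ofList (PySem.List.pyRepeat ['-'] (PySem.Str.len topic))]
    let topic_articles := articles.filter (fun a => pvGet a "topic" "Other" == topic)
    if topic_articles ≠ [] then
      topic_articles.foldl (fun ls2 a => ls2 ++ [pvFmtArticle a]) ls
    else ls ++ ["• No updates today."]) init)
  = init ++ (["Claude Code", "Gemini", "NotebookLM"].map (pvSection articles)).flatten := by
  rw [PySem.List.foldl_congr_mem _ _ (fun ls t => ls ++ pvSection articles t) _
      (fun acc t _ => pv_section_eq articles acc t),
    PySem.List.foldl_append_eq_flatMap, List.flatMap_def]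

-- A's nested foldl over the other topics is init ++ B's flatMap
theorem pv_tail_eq (articles : List (List (String × String))) (init : List String)
    (ots : List String) :
  ots.foldl (fun ls topic =>
    (articles.filter (fun a => pvGet a "topic" "Other" == topic)).foldl
      (fun ls2 a => ls2 ++ ["• [" ++ topic ++ "] " ++ pvGet a "title" "No title"]) ls) init
  = init ++ ots.flatMap (fun t =>
      (articles.filter (fun a => pvTopicOf a == t)).map
        (fun a => "• [" ++ t ++ "] " ++ pvGet a "title" "No title")) := by
  rw [PySem.List.foldl_congr_mem _ _
      (fun ls t => ls ++ (articles.filter (fun a => pvTopicOf a == t)).map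
        (fun a => "• [" ++ t ++ "] " ++ pvGet a "title" "No title")) _
      (by intro acc t _
          rw [PySem.List.foldl_append_singleton_eq_map]
          simp only [pvTopicOf]),
    PySem.List.foldl_append_eq_flatMap]

-- ===== VERDICT =====
theorem fallback_digest_py_spec : Claim_equal_fallback_digest_py := by
  intro articles reason _
  unfold Spec_fallback_digest_py fallback_digest_py fallback_digest_py_alt
  simp only [pv_getD_by_topic, pv_others_eq, pv_main_eq, pv_tail_eq]
  set E := articles.foldl (fun seen a =>
      if !(["Claude Code", "Gemini", "NotebookLM"].contains (pvTopicOf a)) &&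
          !seen.contains (pvTopicOf a) then
        seen ++ [pvTopicOf a]
      else seen) ([] : List String) with hE
  by_cases hr : reason = "" <;> by_cases ho : E = [] <;>
    simp [hr, ho, List.append_assoc]
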